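-- pv_equiv track=rewrite | github.com/E-dC/rasa_helpers | rasa_helpers/tracker_builder.py | _get_latest_action_name
-- ===== SOURCE A (Python) =====
-- from typing import Text, List, Any, Dict, Tuple, Optional, Union
--
-- def _get_latest_action_name(events: List[Dict[Text, Any]]) -> Optional[Text]:
--     for ev in reversed(events):
--         try:
--             return ev['action_name']
--         except KeyError:
--             continue
--     else:
--         return None
-- ===== SOURCE B (Python) =====
-- def _get_latest_action_name(events):
--     matches = [ev['action_name'] for ev in events if 'action_name' in ev]
--     return matches[-1] if matches else None
-- ===== Notes on version B (the rewrite author's own statement) =====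
-- stated objective: alternative
-- what changed: Replaces the reverse early-exit try/except search with a forward collect-all comprehension followed by selecting the last collected name (or None).
import Mathlib
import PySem

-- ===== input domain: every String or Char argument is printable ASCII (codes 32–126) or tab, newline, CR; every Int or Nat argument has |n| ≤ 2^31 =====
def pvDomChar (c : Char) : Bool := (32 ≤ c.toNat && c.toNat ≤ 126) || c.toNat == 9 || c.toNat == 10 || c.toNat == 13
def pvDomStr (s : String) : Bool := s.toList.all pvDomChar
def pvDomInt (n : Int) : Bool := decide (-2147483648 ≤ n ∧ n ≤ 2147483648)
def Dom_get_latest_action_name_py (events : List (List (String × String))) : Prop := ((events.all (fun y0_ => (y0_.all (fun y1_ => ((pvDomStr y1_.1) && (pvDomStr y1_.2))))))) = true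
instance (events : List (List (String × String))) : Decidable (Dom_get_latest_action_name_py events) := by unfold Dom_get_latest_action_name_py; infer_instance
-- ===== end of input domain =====

-- B replaces A's reverse early-exit try/except search by a forward collect-then-take-last
-- decomposition (objective: alternative); return values agree on all inputs.

-- ===== PORT A =====
-- the for-loop over reversed(events): return on the first dict containing the key, else None
def get_latest_action_name_py_loop (revEvents : List (List (String × String))) : Option String :=
  match revEvents with
  | [] => none
  | ev :: rest =>
    match ev.lookup "action_name" with
    | some v => some v          -- 'return ev['action_name']'
    | none => get_latest_action_name_py_loop rest   -- KeyError → continue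

def get_latest_action_name_py (events : List (List (String × String))) : Option String :=
  get_latest_action_name_py_loop events.reverse

-- ===== PORT B =====
-- matches = [ev['action_name'] for ev in events if 'action_name' in ev]; matches[-1] if matches else None
def get_latest_action_name_py_alt (events : List (List (String × String))) : Option String :=
  let ms := events.filterMap (fun ev => ev.lookup "action_name")
  ms.getLast?

-- ===== PRECONDITION & SPEC =====
def Spec_get_latest_action_name_py (events : List (List (String × String))) (out : Option String) : Prop := out = get_latest_action_name_py_alt events
instance (events : List (List (String × String))) (out : Option String) : Decidable (Spec_get_latest_action_name_py events out) := by unfold Spec_get_latest_action_name_py; infer_instance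

-- ===== CLAIM (what is proved, stated in full; the proofs are below) =====
def Claim_equal_get_latest_action_name_py : Prop := ∀ (events : List (List (String × String))), Dom_get_latest_action_name_py events → Spec_get_latest_action_name_py events (get_latest_action_name_py events)

-- ===== LEMMAS AND PROOFS =====
-- A's loop is head? of the filterMap of the list it walks
theorem get_latest_action_name_py_loop_eq (l : List (List (String × String))) :
    get_latest_action_name_py_loop l = (l.filterMap (fun ev => ev.lookup "action_name")).head? := by
  induction l with
  | nil => rfl
  | cons ev rest ih =>
    simp only [get_latest_action_name_py_loop, List.filterMap_cons]
    cases ev.lookup "action_name" <;> simp [ih]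

-- ===== VERDICT (by name: the statement is the Claim_ definition above) =====
theorem get_latest_action_name_py_spec : Claim_equal_get_latest_action_name_py := by
  intro events _
  show get_latest_action_name_py events = get_latest_action_name_py_alt events
  simp [get_latest_action_name_py, get_latest_action_name_py_alt,
    get_latest_action_name_py_loop_eq, List.filterMap_reverse, List.head?_reverse]
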